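-- pv_equiv track=rewrite | github.com/Bimi1804/Decl.-ASAG | python_files/classes.py | __chain_succession_check
-- ===== SOURCE A (Python) =====
-- def __chain_succession_check(act_a,act_b,processed_answer):
--     """
--     Checks if the answer fulfills Chain Succession[A,B]
--
--     Parameters
--     ----------
--     act_a : str
--         The actual text (word) of activity A
--     act_b : str
--         The actual text (word) of activity B
--     processed_answer : str[0..*]
--         the list of processed words of the answer
--
--     Returns
--     -------
--     True -> If the answer fulfills the constraint
--     False -> If the answer does not fulfill the constraint
--     """
--     # True if A and B are not in answer:
--     if act_a not in processed_answer and act_b not in processed_answer: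
--         return True
--     # False if only A or only B is in answer:
--     if act_a not in processed_answer or act_b not in processed_answer:
--         return False
--     checking = processed_answer
--     while act_a in checking or act_b in checking:
--         # False if only A or only B in reamining answer:
--         if act_b not in checking or act_a not in checking:
--             return False
--         marker_a = checking.index(act_a)        # index of the first A
--         # False if A is the last element:
--         if marker_a == len(checking)-1:
--             return False
--         # False is A is not immediately followed by B:
--         if checking[marker_a+1] != act_b:
--             return False
--         checking.pop(marker_a)
--         checking.pop(checking.index(act_b))
--     return True
-- ===== SOURCE B (Python) =====
-- def __chain_succession_check(act_a, act_b, processed_answer):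
--     """Single left-to-right pass: every act_a must be immediately followed by
--     act_b (the pair is consumed), and any act_b met outside such a pair is a
--     violation.  (Unlike A, B does not mutate processed_answer.)"""
--     i = 0
--     n = len(processed_answer)
--     while i < n:
--         w = processed_answer[i]
--         if w == act_a:
--             if i + 1 >= n or processed_answer[i + 1] != act_b:
--                 return False
--             i += 2
--         elif w == act_b:
--             return False
--         else:
--             i += 1
--     return True
-- ===== Notes on version B (the rewrite author's own statement) =====
-- stated objective: alternative
-- what changed: Replaced A's loop of whole-list membership tests, list.index scans and pair-by-pair pops over the remaining list with one left-to-right scan that consumes each 'act_a act_b' pair in place and rejects any stray act_b; B also does not mutate processed_answer.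
import Mathlib
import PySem

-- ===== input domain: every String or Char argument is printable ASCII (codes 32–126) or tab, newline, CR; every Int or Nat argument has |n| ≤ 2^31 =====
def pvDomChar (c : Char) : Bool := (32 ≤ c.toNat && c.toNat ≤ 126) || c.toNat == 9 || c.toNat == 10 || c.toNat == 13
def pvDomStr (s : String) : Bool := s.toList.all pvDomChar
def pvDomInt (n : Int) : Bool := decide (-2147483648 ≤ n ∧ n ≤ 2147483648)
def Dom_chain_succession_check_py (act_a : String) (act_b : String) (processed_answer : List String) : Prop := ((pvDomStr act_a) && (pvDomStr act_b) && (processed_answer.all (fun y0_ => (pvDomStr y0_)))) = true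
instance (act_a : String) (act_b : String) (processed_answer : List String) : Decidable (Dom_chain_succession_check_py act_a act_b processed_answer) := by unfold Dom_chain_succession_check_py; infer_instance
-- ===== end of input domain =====

-- B replaces A's repeated membership-test / index / pop loop by one linear scan that
-- consumes each act_a-act_b pair and rejects stray act_b (alternative algorithm, same
-- measured cost); A pops elements from processed_answer in place, B does not mutate it:
-- the equivalence proved here is about the RETURN value only.


-- ===== PORT A =====
-- the 'while act_a in checking or act_b in checking' loop of A
def pvALoop (act_a act_b : String) (checking : List String) : Bool :=
  if checking.contains act_a || checking.contains act_b then
    if !(checking.contains act_b) || !(checking.contains act_a) then false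
    else
      match PySem.List.index? checking act_a with
      | none => false      -- unreachable: act_a ∈ checking
      | some marker_a =>
        if (marker_a : Int) == (checking.length : Int) - 1 then false
        else
          match PySem.List.pyGet? checking ((marker_a : Int) + 1) with
          | none => false  -- unreachable: marker_a < len - 1
          | some w =>
            if w != act_b then false
            else
              match h1 : PySem.List.pop? checking (marker_a : Int) with
              | none => false     -- unreachable
              | some p1 =>
                match PySem.List.index? p1.2 act_b with
                | none => false   -- unreachable: act_b still present
                | some j =>
                  match h2 : PySem.List.pop? p1.2 (j : Int) with
                  | none => false -- unreachable
                  | some p2 => pvALoop act_a act_b p2.2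
  else true
termination_by checking.length
decreasing_by
  have l1 := PySem.List.length_of_pop?_eq_some _ h1
  have l2 := PySem.List.length_of_pop?_eq_some _ h2
  omega

def chain_succession_check_py (act_a : String) (act_b : String) (processed_answer : List String) : Bool :=
  if !(processed_answer.contains act_a) && !(processed_answer.contains act_b) then true
  else if !(processed_answer.contains act_a) || !(processed_answer.contains act_b) then false
  else pvALoop act_a act_b processed_answer

-- ===== PORT B =====
-- B's single scan: the index advances by 2 over an 'act_a act_b' pair, by 1 otherwise
def pvBLoop (act_a act_b : String) : List String → Bool
  | [] => true
  | w :: rest =>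
    if w == act_a then
      match rest with
      | [] => false
      | x :: rest' => if x != act_b then false else pvBLoop act_a act_b rest'
    else if w == act_b then false
    else pvBLoop act_a act_b rest

def chain_succession_check_py_alt (act_a : String) (act_b : String) (processed_answer : List String) : Bool :=
  pvBLoop act_a act_b processed_answer

-- ===== PRECONDITION & SPEC =====
def Spec_chain_succession_check_py (act_a : String) (act_b : String) (processed_answer : List String) (out : Bool) : Prop := out = chain_succession_check_py_alt act_a act_b processed_answer
instance (act_a : String) (act_b : String) (processed_answer : List String) (out : Bool) : Decidable (Spec_chain_succession_check_py act_a act_b processed_answer out) := by unfold Spec_chain_succession_check_py; infer_instance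

-- ===== CLAIM (what is proved, stated in full; the proofs are below) =====
def Claim_equal_chain_succession_check_py : Prop := ∀ (act_a : String) (act_b : String) (processed_answer : List String), Dom_chain_succession_check_py act_a act_b processed_answer → Spec_chain_succession_check_py act_a act_b processed_answer (chain_succession_check_py act_a act_b processed_answer)

-- ===== LEMMAS AND PROOFS =====

theorem pvBLoop_cons (a b w : String) (rest : List String) :
    pvBLoop a b (w :: rest) =
      if w == a then
        match rest with
        | [] => false
        | x :: rest' => if x != b then false else pvBLoop a b rest'
      else if w == b then false
      else pvBLoop a b rest := by
  cases rest <;> rfl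

-- B's scan walks through a prefix containing neither word
theorem pvBLoop_skip (a b : String) (p t : List String) (ha : a ∉ p) (hb : b ∉ p) :
    pvBLoop a b (p ++ t) = pvBLoop a b t := by
  induction p with
  | nil => rfl
  | cons w p ih =>
    simp only [List.mem_cons, not_or] at ha hb
    rw [List.cons_append, pvBLoop_cons,
      if_neg (by simp [Ne.symm ha.1]), if_neg (by simp [Ne.symm hb.1])]
    exact ih ha.2 hb.2

theorem pvBLoop_none (a b : String) (l : List String) (ha : a ∉ l) (hb : b ∉ l) :
    pvBLoop a b l = true := by
  simpa using pvBLoop_skip a b l [] ha hb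

theorem pvBLoop_only_b (a b : String) (l : List String) (ha : a ∉ l) (hb : b ∈ l) :
    pvBLoop a b l = false := by
  induction l with
  | nil => cases hb
  | cons w rest ih =>
    simp only [List.mem_cons, not_or] at ha
    rw [pvBLoop_cons, if_neg (by simp [Ne.symm ha.1])]
    rcases List.mem_cons.mp hb with h | h
    · rw [if_pos (by simp [h])]
    · rw [ih ha.2 h]; split <;> rfl

theorem pvBLoop_only_a (a b : String) (l : List String) (ha : a ∈ l) (hb : b ∉ l) :
    pvBLoop a b l = false := by
  induction l with
  | nil => cases ha
  | cons w rest ih =>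
    simp only [List.mem_cons, not_or] at hb
    rw [pvBLoop_cons]
    by_cases hw : w = a
    · rw [if_pos (by simp [hw])]
      cases rest with
      | nil => rfl
      | cons x rest' =>
        have hx : x ≠ b := fun h => hb.2 (h ▸ List.mem_cons_self)
        simp [bne_iff_ne, hx]
    · have harest : a ∈ rest := by
        rcases List.mem_cons.mp ha with h | h
        · exact absurd h.symm hw
        · exact h
      rw [ih harest hb.2, if_neg (by simp [hw]), if_neg (by simp [Ne.symm hb.1])]

-- B rejects when a stray act_b precedes the first act_a
theorem pvBLoop_b_first (a b : String) (pb t : List String) (hab : a ≠ b)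
    (hapb : a ∉ pb) (hbpb : b ∉ pb) :
    pvBLoop a b (pb ++ b :: t) = false := by
  rw [pvBLoop_skip a b pb _ hapb hbpb, pvBLoop_cons,
    if_neg (by simp [Ne.symm hab]), if_pos (by simp)]

-- ---- one-step facts about A's loop ----

theorem pvALoop_none (a b : String) (l : List String) (ha : a ∉ l) (hb : b ∉ l) :
    pvALoop a b l = true := by
  rw [pvALoop.eq_def]
  simp [ha, hb]

theorem pvALoop_one (a b : String) (l : List String)
    (h : (a ∈ l ∧ b ∉ l) ∨ (a ∉ l ∧ b ∈ l)) : pvALoop a b l = false := by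
  rw [pvALoop.eq_def]
  rcases h with ⟨ha, hb⟩ | ⟨ha, hb⟩ <;> simp [ha, hb]

theorem pvALoop_redlast (a b : String) (pa : List String) (ha : a ∉ pa) :
    pvALoop a b (pa ++ [a]) = false := by
  by_cases hb : b ∈ pa ++ [a]
  · have hidx : PySem.List.index? (pa ++ [a]) a = some pa.length :=
      (PySem.List.index?_eq_some_iff _ _ _).mpr ⟨pa, [], rfl, rfl, ha⟩
    rw [pvALoop.eq_def, if_pos (by simp), if_neg (by simp [hb])]
    simp only [hidx]
    rw [if_pos (by simp)]
  · rw [pvALoop.eq_def, if_pos (by simp), if_pos (by simp [hb])]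

theorem pvALoop_redbad (a b x : String) (pa sa' : List String) (ha : a ∉ pa) (hx : x ≠ b) :
    pvALoop a b (pa ++ a :: x :: sa') = false := by
  by_cases hb : b ∈ pa ++ a :: x :: sa'
  · have hidx : PySem.List.index? (pa ++ a :: x :: sa') a = some pa.length :=
      (PySem.List.index?_eq_some_iff _ _ _).mpr ⟨pa, x :: sa', rfl, rfl, ha⟩
    have hget : PySem.List.pyGet? (pa ++ a :: x :: sa') (((pa.length : Nat) : Int) + 1) = some x := by
      rw [PySem.List.pyGet?_of_nonneg _ (by positivity)]
      have h1 : (((pa.length : Nat) : Int) + 1).toNat = pa.length + 1 := by omega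
      rw [h1, List.getElem?_append_right (by omega)]
      simp
    rw [pvALoop.eq_def, if_pos (by simp), if_neg (by simp [hb])]
    simp only [hidx]
    rw [if_neg (by simp [List.length_append]; omega)]
    simp only [hget]
    rw [if_pos (by simp [hx])]
  · rw [pvALoop.eq_def, if_pos (by simp), if_pos (by simp [hb])]

theorem pvALoop_red1 (a b : String) (pa sa' : List String) (ha : a ∉ pa) (hb : b ∉ pa) :
    pvALoop a b (pa ++ a :: b :: sa') = pvALoop a b (pa ++ sa') := by
  have hidx : PySem.List.index? (pa ++ a :: b :: sa') a = some pa.length :=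
    (PySem.List.index?_eq_some_iff _ _ _).mpr ⟨pa, b :: sa', rfl, rfl, ha⟩
  have hget : PySem.List.pyGet? (pa ++ a :: b :: sa') (((pa.length : Nat) : Int) + 1) = some b := by
    rw [PySem.List.pyGet?_of_nonneg _ (by positivity)]
    have h1 : (((pa.length : Nat) : Int) + 1).toNat = pa.length + 1 := by omega
    rw [h1, List.getElem?_append_right (by omega)]
    simp
  have hpop1 : PySem.List.pop? (pa ++ a :: b :: sa') ((pa.length : Nat) : Int)
      = some ((pa ++ a :: b :: sa')[pa.length]'(by simp), pa ++ b :: sa') := by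
    rw [PySem.List.pop?_natCast _ _ (by simp)]
    have h2 : (pa ++ a :: b :: sa').eraseIdx pa.length = pa ++ b :: sa' := by
      rw [List.eraseIdx_append_of_length_le le_rfl]; simp
    rw [h2]
  have hidx2 : PySem.List.index? (pa ++ b :: sa') b = some pa.length :=
    (PySem.List.index?_eq_some_iff _ _ _).mpr ⟨pa, sa', rfl, rfl, hb⟩
  have hpop2 : PySem.List.pop? (pa ++ b :: sa') ((pa.length : Nat) : Int)
      = some ((pa ++ b :: sa')[pa.length]'(by simp), pa ++ sa') := by
    rw [PySem.List.pop?_natCast _ _ (by simp)]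
    have h2 : (pa ++ b :: sa').eraseIdx pa.length = pa ++ sa' := by
      rw [List.eraseIdx_append_of_length_le le_rfl]; simp
    rw [h2]
  rw [pvALoop.eq_def, if_pos (by simp), if_neg (by simp)]
  simp only [hidx]
  rw [if_neg (by simp [List.length_append]; omega)]
  simp only [hget]
  rw [if_neg (by simp)]
  split
  · next heq => rw [hpop1] at heq; cases heq
  · next p1 heq =>
      rw [hpop1] at heq
      obtain rfl := (Option.some.injEq _ _).mp heq
      simp only [hidx2]
      split
      · next heq2 => rw [hpop2] at heq2; cases heq2
      · next p2 heq2 =>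
          rw [hpop2] at heq2
          obtain rfl := (Option.some.injEq _ _).mp heq2
          rfl


-- the popped pair, when a stray first act_b lies before the first act_a
theorem pvALoop_red2 (a b : String) (pb sb sa' : List String)
    (ha : a ∉ pb ++ b :: sb) (hbpb : b ∉ pb) :
    pvALoop a b ((pb ++ b :: sb) ++ a :: b :: sa')
      = pvALoop a b (pb ++ (sb ++ b :: sa')) := by
  have hidx : PySem.List.index? ((pb ++ b :: sb) ++ a :: b :: sa') a = some (pb ++ b :: sb).length :=
    (PySem.List.index?_eq_some_iff _ _ _).mpr ⟨pb ++ b :: sb, b :: sa', rfl, rfl, ha⟩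
  have hget : PySem.List.pyGet? ((pb ++ b :: sb) ++ a :: b :: sa') ((((pb ++ b :: sb).length : Nat) : Int) + 1) = some b := by
    rw [PySem.List.pyGet?_of_nonneg _ (by positivity)]
    have h1 : ((((pb ++ b :: sb).length : Nat) : Int) + 1).toNat = (pb ++ b :: sb).length + 1 := by omega
    rw [h1, List.getElem?_append_right (by omega)]
    simp
  have hpop1 : PySem.List.pop? ((pb ++ b :: sb) ++ a :: b :: sa') (((pb ++ b :: sb).length : Nat) : Int)
      = some (((pb ++ b :: sb) ++ a :: b :: sa')[(pb ++ b :: sb).length]'(by simp),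
              pb ++ b :: (sb ++ b :: sa')) := by
    rw [PySem.List.pop?_natCast _ _ (by simp)]
    have h2 : ((pb ++ b :: sb) ++ a :: b :: sa').eraseIdx (pb ++ b :: sb).length
        = pb ++ b :: (sb ++ b :: sa') := by
      rw [List.eraseIdx_append_of_length_le le_rfl]; simp
    rw [h2]
  have hidx2 : PySem.List.index? (pb ++ b :: (sb ++ b :: sa')) b = some pb.length :=
    (PySem.List.index?_eq_some_iff _ _ _).mpr ⟨pb, sb ++ b :: sa', rfl, rfl, hbpb⟩
  have hpop2 : PySem.List.pop? (pb ++ b :: (sb ++ b :: sa')) ((pb.length : Nat) : Int)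
      = some ((pb ++ b :: (sb ++ b :: sa'))[pb.length]'(by simp), pb ++ (sb ++ b :: sa')) := by
    rw [PySem.List.pop?_natCast _ _ (by simp)]
    have h2 : (pb ++ b :: (sb ++ b :: sa')).eraseIdx pb.length = pb ++ (sb ++ b :: sa') := by
      rw [List.eraseIdx_append_of_length_le le_rfl]; simp
    rw [h2]
  rw [pvALoop.eq_def, if_pos (by simp), if_neg (by simp)]
  simp only [hidx]
  rw [if_neg (by simp [List.length_append]; omega)]
  simp only [hget]
  rw [if_neg (by simp)]
  split
  · next heq => rw [hpop1] at heq; cases heq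
  · next p1 heq =>
      rw [hpop1] at heq
      obtain rfl := (Option.some.injEq _ _).mp heq
      simp only [hidx2]
      split
      · next heq2 => rw [hpop2] at heq2; cases heq2
      · next p2 heq2 =>
          rw [hpop2] at heq2
          obtain rfl := (Option.some.injEq _ _).mp heq2
          rfl

-- decompose a list at the FIRST occurrence of v
theorem first_split {v : String} {l : List String} (h : v ∈ l) :
    ∃ p s, l = p ++ v :: s ∧ v ∉ p := by
  obtain ⟨k, hk⟩ := Option.isSome_iff_exists.mp ((PySem.List.index?_isSome_iff l v).mpr h)
  obtain ⟨p, s, rfl, -, hv⟩ := (PySem.List.index?_eq_some_iff _ _ _).mp hk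
  exact ⟨p, s, rfl, hv⟩

-- a stray act_b before the first act_a: the first act_b of the prefix is inside pa
theorem b_mem_first_prefix {a b : String} {p s pa sa : List String}
    (hab : a ≠ b) (hap : a ∉ p)
    (hdec : p ++ b :: s = pa ++ a :: sa) : b ∈ pa := by
  rcases List.append_eq_append_iff.mp hdec with ⟨t, hp, ht⟩ | ⟨t, hpa, ht⟩
  · cases t with
    | nil =>
      simp only [List.nil_append] at ht
      exact absurd ((List.cons.inj ht).1).symm hab
    | cons u t' =>
      have hu : b = u := (List.cons.inj ht).1
      rw [hp, ← hu]
      simp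
  · cases t with
    | nil =>
      simp only [List.nil_append] at ht
      exact absurd ((List.cons.inj ht).1) hab
    | cons u t' =>
      have hu : a = u := (List.cons.inj ht).1
      exact absurd (by rw [hpa, ← hu]; simp : a ∈ p) hap

-- if some act_b occurs with no act_a at or before it, A's loop rejects
theorem pvALoop_blead (a b : String) : ∀ (n : Nat) (l : List String), l.length ≤ n →
    a ≠ b → (∃ p s, l = p ++ b :: s ∧ a ∉ p) → pvALoop a b l = false := by
  intro n
  induction n with
  | zero =>
    rintro l hl hab ⟨p, s, rfl, -⟩
    simp at hl
  | succ n ih =>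
    rintro l hl hab ⟨p, s, hls, hap⟩
    by_cases haL : a ∈ l
    · obtain ⟨pa, sa, hdec, hapa⟩ := first_split haL
      have hbpa : b ∈ pa := b_mem_first_prefix hab hap (hls ▸ hdec)
      obtain ⟨pb, sb, hpab, hbpb⟩ := first_split hbpa
      subst hdec
      cases sa with
      | nil => exact pvALoop_redlast a b pa hapa
      | cons x sa' =>
        by_cases hx : x = b
        · rw [show pa ++ a :: x :: sa' = (pb ++ b :: sb) ++ a :: b :: sa' from by
            rw [hx, hpab], pvALoop_red2 a b pb sb sa' (hpab ▸ hapa) hbpb]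
          have hlpa := congrArg List.length hpab
          simp only [List.length_append, List.length_cons] at hlpa hl
          have hamem : a ∉ pb ++ b :: sb := hpab ▸ hapa
          simp only [List.mem_append, List.mem_cons, not_or] at hamem
          exact ih _ (by simp [List.length_append]; omega) hab
            ⟨pb ++ sb, sa', by simp, by
              simp only [List.mem_append, not_or]
              exact ⟨hamem.1, hamem.2.2⟩⟩
        · exact pvALoop_redbad a b x pa sa' hapa hx
    · refine pvALoop_one a b l (Or.inr ⟨haL, ?_⟩)
      rw [hls]; simp

-- A's loop agrees with B's scan when both words occur
theorem pvALoop_eq (a b : String) : ∀ (n : Nat) (l : List String), l.length ≤ n →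
    a ∈ l → b ∈ l → pvALoop a b l = pvBLoop a b l := by
  intro n
  induction n with
  | zero =>
    intro l hl ha _
    rw [List.length_eq_zero_iff.mp (Nat.le_zero.mp hl)] at ha
    cases ha
  | succ n ih =>
    intro l hl haL hbL
    obtain ⟨pa, sa, rfl, hapa⟩ := first_split haL
    by_cases hbpa : b ∈ pa
    · -- a stray act_b precedes the first act_a: both sides reject
      have hab : a ≠ b := fun h => hapa (h ▸ hbpa)
      obtain ⟨pb, sb, rfl, hbpb⟩ := first_split hbpa
      have hapb : a ∉ pb := fun h => hapa (by simp [h])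
      rw [pvALoop_blead a b (n+1) _ hl hab ⟨pb, sb ++ a :: sa, by simp, hapb⟩,
        show (pb ++ b :: sb) ++ a :: sa = pb ++ b :: (sb ++ a :: sa) from by simp,
        pvBLoop_b_first a b pb _ hab hapb hbpb]
    · have hrhs : pvBLoop a b (pa ++ a :: sa) = pvBLoop a b (a :: sa) :=
        pvBLoop_skip a b pa _ hapa hbpa
      cases sa with
      | nil =>
        rw [pvALoop_redlast a b pa hapa, hrhs, pvBLoop_cons]
        simp
      | cons x sa' =>
        by_cases hx : x = b
        · have hR : pvBLoop a b (pa ++ a :: b :: sa') = pvBLoop a b sa' := by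
            rw [show pa ++ a :: b :: sa' = pa ++ a :: x :: sa' from by rw [hx],
              hrhs, pvBLoop_cons]
            simp [hx]
          rw [show pa ++ a :: x :: sa' = pa ++ a :: b :: sa' from by rw [hx]]
          rw [pvALoop_red1 a b pa sa' hapa hbpa, hR]
          have hlen : (pa ++ sa').length ≤ n := by
            simp only [List.length_append, List.length_cons] at hl ⊢
            omega
          by_cases ha' : a ∈ pa ++ sa' <;> by_cases hb' : b ∈ pa ++ sa'
          · rw [ih _ hlen ha' hb', pvBLoop_skip a b pa sa' hapa hbpa]
          · have ha'' : a ∈ sa' := by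
              rcases List.mem_append.mp ha' with h | h
              · exact absurd h hapa
              · exact h
            rw [pvALoop_one a b _ (Or.inl ⟨ha', hb'⟩),
              pvBLoop_only_a a b sa' ha'' (fun h => hb' (by simp [h]))]
          · have hb'' : b ∈ sa' := by
              rcases List.mem_append.mp hb' with h | h
              · exact absurd h hbpa
              · exact h
            rw [pvALoop_one a b _ (Or.inr ⟨ha', hb'⟩),
              pvBLoop_only_b a b sa' (fun h => ha' (by simp [h])) hb'']
          · rw [pvALoop_none a b _ ha' hb',
              pvBLoop_none a b sa' (fun h => ha' (by simp [h])) (fun h => hb' (by simp [h]))]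
        · have hR : pvBLoop a b (pa ++ a :: x :: sa') = false := by
            rw [hrhs, pvBLoop_cons]
            simp [bne_iff_ne, hx]
          rw [pvALoop_redbad a b x pa sa' hapa hx, hR]

theorem chain_eq (a b : String) (l : List String) :
    chain_succession_check_py a b l = chain_succession_check_py_alt a b l := by
  unfold chain_succession_check_py chain_succession_check_py_alt
  by_cases hA : a ∈ l <;> by_cases hB : b ∈ l
  · rw [if_neg (by simp [hA]), if_neg (by simp [hA, hB])]
    exact pvALoop_eq a b l.length l le_rfl hA hB
  · rw [if_neg (by simp [hA]), if_pos (by simp [hA, hB]), pvBLoop_only_a a b l hA hB]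
  · rw [if_neg (by simp [hB]), if_pos (by simp [hA, hB]), pvBLoop_only_b a b l hA hB]
  · rw [if_pos (by simp [hA, hB]), pvBLoop_none a b l hA hB]

-- ===== VERDICT (by name: the statement is the Claim_ definition above) =====
theorem chain_succession_check_py_spec : Claim_equal_chain_succession_check_py := by
  intro a b l _
  exact chain_eq a b l
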